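-- pv_equiv track=rewrite | github.com/worhels/Osnovy_kryptohrafichnoho_zakhystu_informatsii | 4_lab/simplified_aes.py | gf_multiply
-- ===== SOURCE A (Python) =====
-- IRREDUCIBLE = 0b10011
--
-- def gf_multiply(a: int, b: int) -> int:
--     result = 0
--     left = a & 0xF
--     right = b & 0xF
--     for _ in range(4):
--         if right & 1:
--             result ^= left
--         right >>= 1
--         carry = left & 0x8
--         left = (left << 1) & 0xF
--         if carry:
--             left ^= IRREDUCIBLE & 0xF
--     return result & 0xF
-- ===== SOURCE B (Python) =====
-- IRREDUCIBLE = 0b10011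
--
-- # Discrete-log tables for GF(2^4) with irreducible x^4+x+1 and generator g=2,
-- # built once by stepping g through all 15 nonzero field elements.
-- _EXP = [0] * 15
-- _LOG = [0] * 16
-- _x = 1
-- for _i in range(15):
--     _EXP[_i] = _x
--     _LOG[_x] = _i
--     _x <<= 1
--     if _x & 0x10:
--         _x ^= IRREDUCIBLE
--
--
-- def gf_multiply(a: int, b: int) -> int:
--     a &= 0xF
--     b &= 0xF
--     if a == 0 or b == 0:
--         return 0
--     return _EXP[(_LOG[a] + _LOG[b]) % 15]
-- ===== Notes on version B (the rewrite author's own statement) =====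
-- stated objective: idiomatic
-- what changed: Replaced A's 4-round shift-and-reduce (Russian-peasant) loop with exp/log discrete-logarithm tables built once from generator 2 over the same irreducible polynomial; multiplication becomes a zero test plus table lookups.
import Mathlib
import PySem

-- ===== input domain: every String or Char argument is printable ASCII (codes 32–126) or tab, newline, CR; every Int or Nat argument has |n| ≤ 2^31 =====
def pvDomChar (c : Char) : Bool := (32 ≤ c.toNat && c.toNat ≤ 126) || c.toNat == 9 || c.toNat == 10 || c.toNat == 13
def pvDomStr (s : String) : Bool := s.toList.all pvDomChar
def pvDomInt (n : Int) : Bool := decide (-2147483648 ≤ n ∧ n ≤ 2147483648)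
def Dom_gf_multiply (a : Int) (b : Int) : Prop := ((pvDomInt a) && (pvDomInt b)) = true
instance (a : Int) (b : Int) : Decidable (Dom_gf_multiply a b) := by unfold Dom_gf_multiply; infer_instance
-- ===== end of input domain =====

-- B replaces A's 4-round shift-and-reduce loop by exp/log tables built once from generator 2 (objective: idiomatic table-lookup field multiply; no speed claim).

-- ===== PORT A =====
-- the loop body over the state (result, left, right); the Python `for _ in range(4)` is the fold below
def gfLoopA : Int × Int × Int → Int × Int × Int := fun st =>
  let result := if PySem.Int.band st.2.2 1 ≠ 0 then PySem.Int.bxor st.1 st.2.1 else st.1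
  let right := st.2.2 >>> 1
  let carry := PySem.Int.band st.2.1 8
  let left := PySem.Int.band (st.2.1 <<< 1) 15
  let left := if carry ≠ 0 then PySem.Int.bxor left (PySem.Int.band 19 15) else left
  (result, left, right)

-- the function body after the initial masks `a & 0xF`, `b & 0xF`
def gfCoreA (left : Int) (right : Int) : Int :=
  PySem.Int.band ((List.range 4).foldl (fun st _ => gfLoopA st) (0, left, right)).1 15

def gf_multiply (a : Int) (b : Int) : Int :=
  gfCoreA (PySem.Int.band a 15) (PySem.Int.band b 15)

-- ===== PORT B =====
-- module-level table build of Source B: one pass of 15 steps carrying (_EXP, _LOG, _x)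
def gfTables : List Int × List Int :=
  let st := (List.range 15).foldl
    (fun (st : List Int × List Int × Int) i =>
      let e := st.1.set i st.2.2
      let l := st.2.1.set st.2.2.toNat (Int.ofNat i)   -- _x is a nonneg field element, so toNat is exact here
      let x := st.2.2 <<< 1
      let x := if PySem.Int.band x 16 ≠ 0 then PySem.Int.bxor x 19 else x
      (e, l, x))
    (List.replicate 15 0, List.replicate 16 0, 1)
  (st.1, st.2.1)

-- the function body after the masks; the list indices are nonneg in range, so getD/toNat are exact
def gfCoreB (a : Int) (b : Int) : Int :=
  if a = 0 ∨ b = 0 then 0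
  else gfTables.1.getD (((gfTables.2.getD a.toNat 0) + (gfTables.2.getD b.toNat 0)).toNat % 15) 0

def gf_multiply_alt (a : Int) (b : Int) : Int :=
  gfCoreB (PySem.Int.band a 15) (PySem.Int.band b 15)

-- ===== PRECONDITION & SPEC =====
def Spec_gf_multiply (a : Int) (b : Int) (out : Int) : Prop := out = gf_multiply_alt a b
instance (a : Int) (b : Int) (out : Int) : Decidable (Spec_gf_multiply a b out) := by unfold Spec_gf_multiply; infer_instance

-- ===== CLAIM (what is proved, stated in full; the proofs are below) =====
def Claim_equal_gf_multiply : Prop := ∀ (a : Int) (b : Int), Dom_gf_multiply a b → Spec_gf_multiply a b (gf_multiply a b)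

-- ===== LEMMAS AND PROOFS =====

-- the mask a & 0xF lands in [0, 16)
lemma band15_nonneg (a : Int) : 0 ≤ PySem.Int.band a 15 := by
  rw [PySem.Int.band_comm]
  exact PySem.Int.band_nonneg_of_nonneg_left a (by norm_num)

lemma band15_lt (a : Int) : PySem.Int.band a 15 < 16 := by
  rw [PySem.Int.band]
  split_ifs with h1 h2 h2
  · have := Nat.and_le_right (n := a.toNat) (m := (15 : Int).toNat)
    norm_num at this ⊢
    omega
  · omega
  · have : ((15 : Int).toNat - ((15 : Int).toNat &&& (-a - 1).toNat) : Nat) ≤ 15 := by omega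
    omega
  · omega

-- the two cores agree on every masked pair
lemma core_eq : ∀ x y : Fin 16, gfCoreA (x : Nat) (y : Nat) = gfCoreB (x : Nat) (y : Nat) := by
  decide

-- ===== VERDICT (by name: the statement is the Claim_ definition above) =====
theorem gf_multiply_spec : Claim_equal_gf_multiply := by
  intro a b _
  unfold Spec_gf_multiply gf_multiply gf_multiply_alt
  have ha0 := band15_nonneg a
  have ha1 := band15_lt a
  have hb0 := band15_nonneg b
  have hb1 := band15_lt b
  have hx : PySem.Int.band a 15 = ((PySem.Int.band a 15).toNat : Int) := (Int.toNat_of_nonneg ha0).symm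
  have hy : PySem.Int.band b 15 = ((PySem.Int.band b 15).toNat : Int) := (Int.toNat_of_nonneg hb0).symm
  rw [hx, hy]
  exact core_eq ⟨(PySem.Int.band a 15).toNat, by omega⟩ ⟨(PySem.Int.band b 15).toNat, by omega⟩
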